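-- pv_equiv track=rewrite | github.com/matiasportugau-ui/GPT-PANELIN-V3.3 | .evolucionador/core/optimizer.py | _find_cacheable_calls
-- ===== SOURCE A (Python) =====
-- from typing import Dict, List, Any, Optional, Tuple, Set
-- from collections import defaultdict
--
-- def _find_cacheable_calls(call_log: List[Dict[str, Any]]) -> List[int]:
--     """Find calls that should be cached."""
--     cacheable = []
--     call_methods = defaultdict(int)
--
--     for i, call in enumerate(call_log):
--         method = call.get('method', 'GET')
--         call_methods[method] += 1
--
--         # GET calls that appear multiple times are good candidates
--         if method == 'GET' and call_methods[method] > 1: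
--             cacheable.append(i)
--
--     return cacheable
-- ===== SOURCE B (Python) =====
-- def _find_cacheable_calls(call_log):
--     """Find calls that should be cached.
--
--     Two-phase search-then-scan: phase 1 searches for the position of the
--     first GET call and stops there; phase 2 scans only the suffix after it,
--     collecting the indices of the remaining GET calls."""
--     first = None
--     for i, call in enumerate(call_log):
--         if call.get('method', 'GET') == 'GET':
--             first = i
--             break
--     if first is None:
--         return []
--     return [first + 1 + k for k, call in enumerate(call_log[first + 1:])
--             if call.get('method', 'GET') == 'GET']
-- ===== Notes on version B (the rewrite author's own statement) =====
-- stated objective: alternative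
-- what changed: Replaces A's stateful counting pass (defaultdict counter with a per-iteration count>1 test) by a two-phase search-then-scan: first an early-exiting search for the position of the first GET call, then a second scan over only the suffix after that position collecting GET indices; no counter is maintained.
import Mathlib
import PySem

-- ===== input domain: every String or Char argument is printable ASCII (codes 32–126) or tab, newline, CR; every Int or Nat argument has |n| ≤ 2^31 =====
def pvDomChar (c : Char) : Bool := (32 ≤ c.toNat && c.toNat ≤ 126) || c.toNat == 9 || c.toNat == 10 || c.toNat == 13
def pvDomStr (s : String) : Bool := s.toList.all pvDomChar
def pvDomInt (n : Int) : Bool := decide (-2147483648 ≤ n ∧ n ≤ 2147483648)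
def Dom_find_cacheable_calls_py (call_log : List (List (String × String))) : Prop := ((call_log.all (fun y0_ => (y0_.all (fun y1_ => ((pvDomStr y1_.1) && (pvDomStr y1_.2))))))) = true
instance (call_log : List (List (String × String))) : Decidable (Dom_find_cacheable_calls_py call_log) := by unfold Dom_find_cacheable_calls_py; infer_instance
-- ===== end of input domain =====

-- B replaces A's counting pass by a two-phase search-then-scan: find the first GET, then collect GET indices in the suffix after it (alternative decomposition, same cost).


-- ===== PORT A =====
-- call.get('method', 'GET') on the association-list dict: first match, default "GET"
def pvCallMethod (call : List (String × String)) : String :=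
  ((call.find? (fun p => p.1 == "method")).map (·.2)).getD "GET"

-- literal port of A: one pass with a defaultdict(int) counter; append i when the method
-- is 'GET' and its count after increment exceeds 1
def find_cacheable_calls_py (call_log : List (List (String × String))) : List Int :=
  ((PySem.List.enumerate call_log).foldl
    (fun (st : List Int × PySem.Dict String Int) ic =>
      let method := pvCallMethod ic.2
      let d := st.2.modify method 0 (· + 1)
      if method == "GET" && d.getD method 0 > 1 then (st.1 ++ [ic.1], d) else (st.1, d))
    ([], PySem.Dict.empty)).1

-- ===== PORT B =====
-- port of B: phase 1, the early-exiting search for the first GET ('for … break' = find?);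
-- phase 2, a comprehension over enumerate(call_log[first+1:]) collecting GET indices
def find_cacheable_calls_py_alt (call_log : List (List (String × String))) : List Int :=
  match (PySem.List.enumerate call_log).find? (fun ic => pvCallMethod ic.2 == "GET") with
  | none => []
  | some fc =>
      ((PySem.List.enumerate (PySem.List.slice call_log (some (fc.1 + 1)) none)).filter
        (fun kc => pvCallMethod kc.2 == "GET")).map (fun kc => fc.1 + 1 + kc.1)

-- ===== PRECONDITION & SPEC =====
def Spec_find_cacheable_calls_py (call_log : List (List (String × String))) (out : List Int) : Prop := out = find_cacheable_calls_py_alt call_log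
instance (call_log : List (List (String × String))) (out : List Int) : Decidable (Spec_find_cacheable_calls_py call_log out) := by unfold Spec_find_cacheable_calls_py; infer_instance

-- ===== CLAIM (what is proved, stated in full; the proofs are below) =====
def Claim_equal_find_cacheable_calls_py : Prop := ∀ (call_log : List (List (String × String))), Dom_find_cacheable_calls_py call_log → Spec_find_cacheable_calls_py call_log (find_cacheable_calls_py call_log)

-- ===== LEMMAS AND PROOFS =====

-- the list of indices of GET calls in l, counting from s
def pvGets (l : List (List (String × String))) (s : Int) : List Int :=
  ((PySem.List.enumerate l s).filter (fun ic => pvCallMethod ic.2 == "GET")).map (·.1)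

-- shifting the enumerate start by one shifts every index by one
theorem pvEnumShift (l : List (List (String × String))) (s : Int) :
    PySem.List.enumerate l (s + 1) = (PySem.List.enumerate l s).map (fun p => (p.1 + 1, p.2)) := by
  induction l generalizing s with
  | nil => simp [PySem.List.enumerate_nil]
  | cons c t ih =>
    rw [PySem.List.enumerate_cons, PySem.List.enumerate_cons, List.map_cons, ih (s + 1)]

-- loop invariant for A's fold: with a GET-count c ≥ 0 already in the dict, the fold appends
-- all GET indices of the remaining list when c ≥ 1, and all but the first when c = 0.
theorem pvLoopInv (ps : List (Int × List (String × String))) (acc : List Int)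
    (d : PySem.Dict String Int) (h : 0 ≤ d.getD "GET" 0) :
    (ps.foldl
      (fun (st : List Int × PySem.Dict String Int) ic =>
        let method := pvCallMethod ic.2
        let d := st.2.modify method 0 (· + 1)
        if method == "GET" && d.getD method 0 > 1 then (st.1 ++ [ic.1], d) else (st.1, d))
      (acc, d)).1 =
    acc ++ (if 1 ≤ d.getD "GET" 0
            then (ps.filter (fun ic => pvCallMethod ic.2 == "GET")).map (·.1)
            else ((ps.filter (fun ic => pvCallMethod ic.2 == "GET")).map (·.1)).drop 1) := by
  induction ps generalizing acc d with
  | nil => simp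
  | cons ic rest ih =>
    simp only [List.foldl_cons, List.filter_cons]
    by_cases hm : pvCallMethod ic.2 = "GET"
    · have hd : (d.modify (pvCallMethod ic.2) 0 (· + 1)).getD (pvCallMethod ic.2) 0
          = d.getD (pvCallMethod ic.2) 0 + 1 := PySem.Dict.getD_modify_self ..
      have hdg : (d.modify (pvCallMethod ic.2) 0 (· + 1)).getD "GET" 0
          = d.getD "GET" 0 + 1 := by rw [hm] at hd ⊢; exact hd
      by_cases hc : 1 ≤ d.getD "GET" 0
      · have hcond : (pvCallMethod ic.2 == "GET" && decide ((d.modify (pvCallMethod ic.2) 0 (· + 1)).getD (pvCallMethod ic.2) 0 > 1)) = true := by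
          rw [hm] at hd ⊢; simp [hd]; omega
        simp only [hcond, if_pos]
        rw [ih _ _ (by omega)]
        simp [hm, hc, show 1 ≤ d.getD "GET" 0 + 1 by omega]
      · have hc0 : d.getD "GET" 0 = 0 := by omega
        have hcond : (pvCallMethod ic.2 == "GET" && decide ((d.modify (pvCallMethod ic.2) 0 (· + 1)).getD (pvCallMethod ic.2) 0 > 1)) = false := by
          rw [hm] at hd ⊢; simp [hd]; omega
        simp only [hcond, Bool.false_eq_true, if_neg, not_false_iff]
        rw [ih _ _ (by omega)]
        simp [hm, hc0]
    · have hdg : (d.modify (pvCallMethod ic.2) 0 (· + 1)).getD "GET" 0 = d.getD "GET" 0 :=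
        PySem.Dict.getD_modify_of_ne d 0 _ (fun h => hm h.symm)
      have hcond : (pvCallMethod ic.2 == "GET" && decide ((d.modify (pvCallMethod ic.2) 0 (· + 1)).getD (pvCallMethod ic.2) 0 > 1)) = false := by
        simp [hm]
      simp only [hcond, Bool.false_eq_true, if_neg, not_false_iff]
      rw [ih _ _ (by omega)]
      simp [hm, hdg]

-- B computes exactly 'all GET indices with the first one dropped'
theorem pvAltEq (l : List (List (String × String))) :
    find_cacheable_calls_py_alt l = (pvGets l 0).drop 1 := by
  induction l with
  | nil => simp [find_cacheable_calls_py_alt, pvGets, PySem.List.enumerate_nil]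
  | cons c t ih =>
    unfold find_cacheable_calls_py_alt at ih ⊢
    rw [PySem.List.enumerate_cons]
    by_cases hc : pvCallMethod c = "GET"
    · -- head is the first GET: B collects GETs of the tail at offset 1
      have hrhs : pvGets (c :: t) 0 = 0 :: (pvGets t 0).map (· + 1) := by
        unfold pvGets
        rw [PySem.List.enumerate_cons, pvEnumShift, List.filter_cons]
        simp [hc, List.filter_map, List.map_map]
        rfl
      rw [List.find?_cons_of_pos (by simp [hc])]
      simp only []
      have hslice : PySem.List.slice (c :: t) (some ((0 : Int) + 1)) none = t := by
        norm_num [PySem.List.slice_from_one]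
      rw [hslice, hrhs, List.drop_one, List.tail_cons]
      unfold pvGets
      rw [List.map_map]
      apply List.map_congr_left
      intro a _; simp; ring
    · -- head is not GET: everything in (c :: t) is everything in t shifted by one
      have hcons : pvGets (c :: t) 0 = (pvGets t 0).map (· + 1) := by
        unfold pvGets
        rw [PySem.List.enumerate_cons, pvEnumShift, List.filter_cons]
        simp [hc, List.filter_map, List.map_map]
        rfl
      rw [List.find?_cons_of_neg (by simp [hc]), pvEnumShift, List.find?_map]
      simp only [Function.comp_def]
      rw [hcons, ← List.map_drop, ← ih]
      cases hf : (PySem.List.enumerate t 0).find? (fun ic => pvCallMethod ic.2 == "GET") with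
      | none => simp
      | some fc =>
        simp only [Option.map_some]
        -- fc comes from enumerate t 0, so its index is a natural number k
        have hmem : fc ∈ PySem.List.enumerate t 0 := List.mem_of_find?_eq_some hf
        obtain ⟨k, hk, hfc⟩ := (PySem.List.mem_enumerate_iff t 0 fc).mp hmem
        have hfc1 : fc.1 = (k : Int) := by rw [hfc]; simp
        have hs1 : PySem.List.slice (c :: t) (some (fc.1 + 1 + 1)) none = t.drop (k + 1) := by
          rw [hfc1, show ((k : Int) + 1 + 1) = ((k + 2 : Nat) : Int) by push_cast; ring,
              PySem.List.slice_from_natCast]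
          rfl
        have hs2 : PySem.List.slice t (some (fc.1 + 1)) none = t.drop (k + 1) := by
          rw [hfc1, show ((k : Int) + 1) = ((k + 1 : Nat) : Int) by push_cast; ring,
              PySem.List.slice_from_natCast]
        rw [hs1, hs2, List.map_map]
        apply List.map_congr_left
        intro a _; simp; ring

-- ===== VERDICT (by name: the statement is the Claim_ definition above) =====
theorem find_cacheable_calls_py_spec : Claim_equal_find_cacheable_calls_py := by
  intro call_log _
  show find_cacheable_calls_py call_log = find_cacheable_calls_py_alt call_log
  unfold find_cacheable_calls_py
  rw [pvLoopInv _ [] PySem.Dict.empty (by simp), pvAltEq]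
  simp [pvGets]
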